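-- pv_equiv track=rewrite | github.com/samuelepapa/fit-a-nef | tasks/utils.py | get_num_nefs_list
-- ===== SOURCE A (Python) =====
-- import math
-- from typing import Dict, List, Optional
--
-- def find_seed_idx(idx: int, signals_in_dset: int) -> int:
--     return math.floor(idx / signals_in_dset)
--
-- def get_signal_idx(idx: int, signals_in_dset: int) -> int:
--     return idx % signals_in_dset
--
-- def get_num_nefs_list(
--     nef_start_idx: int, nef_end_idx: int, num_parallel_nefs: int, signals_in_dset: int
-- ) -> List[int]:
--     """Split the nefs into chunks of size num_parallel_nefs. Keeps into account the seeding of the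
--     nefs. Assumes that the nefs are ordered by seed and that nef_end_idx is not too large (i.e. it
--     is not larger than signals_in_dset*number_of_seeds).
--
--     Args:
--         nef_start_idx (int): The starting index of the nefs to train.
--         nef_end_idx (int): The ending index of the nefs to train.
--         num_parallel_nefs (int): The number of nefs to train in parallel.
--         signals_in_dset (int): The number of signals in the dataset.
--
--     Returns:
--         List[int]: The number of nefs to train in each chunk.
--     """
--
--     assert num_parallel_nefs <= signals_in_dset, (
--         f"Number of parallel nef ({num_parallel_nefs}) "
--         f"cannot be larger than the dataset size ({signals_in_dset})."
--     )
--     # Split the nefs into chunks of size num_parallel_nefs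
--     num_nefs_list = []
--     start_idx = nef_start_idx
--     # keep adding chunks until we reach the desired end
--     while start_idx < nef_end_idx:
--         # By default this is the number of nefs to train
--         nefs_to_train = num_parallel_nefs
--
--         # find the seeds that the first nef and last nef in this parallel
--         # chunk belong to
--         start_seed_idx = find_seed_idx(start_idx, signals_in_dset)
--         end_seed_idx = find_seed_idx(start_idx + num_parallel_nefs - 1, signals_in_dset)
--
--         # if they are not the same, we need to reduce the number of nefs to
--         # train in order to have each chunk share the same seed
--         if start_seed_idx != end_seed_idx:
--             nefs_to_train = signals_in_dset - get_signal_idx(start_idx, signals_in_dset)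
--
--         # the last chunk might be smaller than the parallel chunk size
--         if start_idx + nefs_to_train > nef_end_idx:
--             nefs_to_train = nef_end_idx - start_idx
--
--         num_nefs_list.append(nefs_to_train)
--         start_idx += nefs_to_train
--
--     total_nefs = nef_end_idx - nef_start_idx
--     assert sum(num_nefs_list) == total_nefs, (
--         f"Something went wrong when splitting the nefs into chunks of size "
--         f"{num_parallel_nefs}."
--     )
--
--     return num_nefs_list
-- ===== SOURCE B (Python) =====
-- def get_num_nefs_list(nef_start_idx, nef_end_idx, num_parallel_nefs, signals_in_dset):
--     assert num_parallel_nefs <= signals_in_dset, (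
--         f"Number of parallel nef ({num_parallel_nefs}) "
--         f"cannot be larger than the dataset size ({signals_in_dset})."
--     )
--     chunks = []
--     lo = nef_start_idx
--     while lo < nef_end_idx:
--         # span of the seed containing lo, clipped to the requested range
--         hi = min((lo // signals_in_dset + 1) * signals_in_dset, nef_end_idx)
--         cur = lo
--         while cur < hi:
--             step = min(num_parallel_nefs, hi - cur)
--             chunks.append(step)
--             cur += step
--         lo = hi
--     return chunks
-- ===== Notes on version B (the rewrite author's own statement) =====
-- stated objective: alternative
-- what changed: Replaces A's flat cursor loop that re-derives the seed of both chunk ends and patches the chunk size with two conditionals by a nested traversal: an outer loop over consecutive seed spans clipped to the requested range, and an inner loop emitting min(num_parallel_nefs, remaining-in-span) chunks.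
-- outside the precondition, e.g. on get_num_nefs_list(0, 5, 0, 3): A returns [3, 2], B does not finish within the time limit
-- crash fix: A raises AssertionError whenever nef_end_idx < nef_start_idx (with num_parallel_nefs <= signals_in_dset so its first assert passes): the loop body never runs and the final sum-check fails on the negative total; B returns [] there, the natural chunking of an empty range. — e.g. on get_num_nefs_list(3, 1, 2, 5): A raises AssertionError, B returns []
import Mathlib
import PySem

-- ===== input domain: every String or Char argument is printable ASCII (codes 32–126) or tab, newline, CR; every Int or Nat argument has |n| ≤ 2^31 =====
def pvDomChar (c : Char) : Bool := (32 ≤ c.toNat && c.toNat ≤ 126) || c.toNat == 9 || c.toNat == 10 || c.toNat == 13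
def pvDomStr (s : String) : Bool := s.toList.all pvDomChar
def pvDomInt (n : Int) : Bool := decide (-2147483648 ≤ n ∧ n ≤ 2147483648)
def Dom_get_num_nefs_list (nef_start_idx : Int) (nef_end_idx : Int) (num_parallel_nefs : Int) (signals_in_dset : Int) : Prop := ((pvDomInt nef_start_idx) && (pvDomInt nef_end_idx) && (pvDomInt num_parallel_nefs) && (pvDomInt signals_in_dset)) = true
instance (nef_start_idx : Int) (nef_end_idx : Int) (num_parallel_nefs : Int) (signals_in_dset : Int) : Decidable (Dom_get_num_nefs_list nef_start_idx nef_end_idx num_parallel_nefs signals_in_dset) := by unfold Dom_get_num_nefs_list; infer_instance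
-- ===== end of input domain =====

-- B replaces A's flat cursor loop (seed computed for both chunk ends, size patched by two
-- conditionals) with a nested seed-span-then-chunk traversal; same cost, different decomposition.

-- ===== PORT A =====
-- math.floor(idx / signals_in_dset): exact equal to floor division for |idx| ≤ 2^33 (our Dom),
-- since the float quotient can never round across an integer at these magnitudes.
def pvFindSeedIdx (idx : Int) (signals_in_dset : Int) : Int :=
  PySem.Int.floordiv idx signals_in_dset

def pvGetSignalIdx (idx : Int) (signals_in_dset : Int) : Int :=
  PySem.Int.mod idx signals_in_dset

-- A's while loop; fuel = nef_end_idx - start_idx bounds the iteration count (each admitted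
-- iteration advances the cursor by at least 1).
def pvALoop (endI P S : Int) : Nat → Int → List Int
  | 0, _ => []
  | fuel+1, start_idx =>
    if start_idx < endI then
      let nefs_to_train := P
      let start_seed_idx := pvFindSeedIdx start_idx S
      let end_seed_idx := pvFindSeedIdx (start_idx + P - 1) S
      let nefs_to_train := if start_seed_idx ≠ end_seed_idx then S - pvGetSignalIdx start_idx S else nefs_to_train
      let nefs_to_train := if start_idx + nefs_to_train > endI then endI - start_idx else nefs_to_train
      nefs_to_train :: pvALoop endI P S fuel (start_idx + nefs_to_train)
    else []

def get_num_nefs_list (nef_start_idx : Int) (nef_end_idx : Int) (num_parallel_nefs : Int) (signals_in_dset : Int) : List Int :=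
  pvALoop nef_end_idx num_parallel_nefs signals_in_dset (nef_end_idx - nef_start_idx).toNat nef_start_idx

-- ===== PORT B =====
-- (B's leading assert has no arithmetic effect; Pre_ excludes the inputs on which it fires)
-- inner loop: chunks of one clipped seed span [cur, hi)
def pvBInner (hi P : Int) : Nat → Int → List Int
  | 0, _ => []
  | fuel+1, cur =>
    if cur < hi then
      min P (hi - cur) :: pvBInner hi P fuel (cur + min P (hi - cur))
    else []

-- outer loop: consecutive seed spans clipped to [lo, endI)
def pvBOuter (endI P S : Int) : Nat → Int → List Int
  | 0, _ => []
  | fuel+1, lo =>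
    if lo < endI then
      let hi := min ((PySem.Int.floordiv lo S + 1) * S) endI
      pvBInner hi P (hi - lo).toNat lo ++ pvBOuter endI P S fuel hi
    else []

def get_num_nefs_list_alt (nef_start_idx : Int) (nef_end_idx : Int) (num_parallel_nefs : Int) (signals_in_dset : Int) : List Int :=
  pvBOuter nef_end_idx num_parallel_nefs signals_in_dset (nef_end_idx - nef_start_idx).toNat nef_start_idx

-- ===== PRECONDITION & SPEC =====
-- Pre_ excludes exactly: inputs where A raises (num_parallel_nefs > signals_in_dset or
-- nef_start_idx > nef_end_idx fail an assert; signals_in_dset = 0 with a nonempty range divides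
-- by zero), and nonpositive num_parallel_nefs with a nonempty range, where A usually diverges and
-- only accidentally terminates when the start sits on a seed boundary while B's inner loop diverges.
def Pre_get_num_nefs_list (nef_start_idx : Int) (nef_end_idx : Int) (num_parallel_nefs : Int) (signals_in_dset : Int) : Prop :=
  num_parallel_nefs ≤ signals_in_dset ∧ nef_start_idx ≤ nef_end_idx ∧
    (nef_start_idx < nef_end_idx → 1 ≤ num_parallel_nefs)
instance (nef_start_idx : Int) (nef_end_idx : Int) (num_parallel_nefs : Int) (signals_in_dset : Int) : Decidable (Pre_get_num_nefs_list nef_start_idx nef_end_idx num_parallel_nefs signals_in_dset) := by unfold Pre_get_num_nefs_list; infer_instance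

def pvWitness_get_num_nefs_list : Int × Int × Int × Int := (0, 12, 3, 7)

-- A raises AssertionError whenever nef_end_idx < nef_start_idx (and its first assert passes,
-- num_parallel_nefs ≤ signals_in_dset): the loop never runs and the final sum-check fails on the
-- negative total; B returns [] there, the natural chunking of an empty range.
def Raises_get_num_nefs_list (nef_start_idx : Int) (nef_end_idx : Int) (num_parallel_nefs : Int) (signals_in_dset : Int) : Prop :=
  num_parallel_nefs ≤ signals_in_dset ∧ nef_end_idx < nef_start_idx
instance (nef_start_idx : Int) (nef_end_idx : Int) (num_parallel_nefs : Int) (signals_in_dset : Int) : Decidable (Raises_get_num_nefs_list nef_start_idx nef_end_idx num_parallel_nefs signals_in_dset) := by unfold Raises_get_num_nefs_list; infer_instance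
def pvRaiseWitness_get_num_nefs_list : Int × Int × Int × Int := (3, 1, 2, 5)
def pvRaiseWitnessOut_get_num_nefs_list : List Int := []

def Spec_get_num_nefs_list (nef_start_idx : Int) (nef_end_idx : Int) (num_parallel_nefs : Int) (signals_in_dset : Int) (out : List Int) : Prop := out = get_num_nefs_list_alt nef_start_idx nef_end_idx num_parallel_nefs signals_in_dset
instance (nef_start_idx : Int) (nef_end_idx : Int) (num_parallel_nefs : Int) (signals_in_dset : Int) (out : List Int) : Decidable (Spec_get_num_nefs_list nef_start_idx nef_end_idx num_parallel_nefs signals_in_dset out) := by unfold Spec_get_num_nefs_list; infer_instance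

-- ===== CLAIM (what is proved, stated in full; the proofs are below) =====
def Claim_equal_get_num_nefs_list : Prop := ∀ (nef_start_idx : Int) (nef_end_idx : Int) (num_parallel_nefs : Int) (signals_in_dset : Int), Dom_get_num_nefs_list nef_start_idx nef_end_idx num_parallel_nefs signals_in_dset → Pre_get_num_nefs_list nef_start_idx nef_end_idx num_parallel_nefs signals_in_dset → Spec_get_num_nefs_list nef_start_idx nef_end_idx num_parallel_nefs signals_in_dset (get_num_nefs_list nef_start_idx nef_end_idx num_parallel_nefs signals_in_dset)
def Claim_raises_get_num_nefs_list : Prop := (∀ (nef_start_idx : Int) (nef_end_idx : Int) (num_parallel_nefs : Int) (signals_in_dset : Int), Dom_get_num_nefs_list nef_start_idx nef_end_idx num_parallel_nefs signals_in_dset → Raises_get_num_nefs_list nef_start_idx nef_end_idx num_parallel_nefs signals_in_dset → ¬ Pre_get_num_nefs_list nef_start_idx nef_end_idx num_parallel_nefs signals_in_dset) ∧ (Dom_get_num_nefs_list (pvRaiseWitness_get_num_nefs_list.1) (pvRaiseWitness_get_num_nefs_list.2.1) (pvRaiseWitness_get_num_nefs_list.2.2.1) (pvRaiseWitness_get_num_nefs_list.2.2.2)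 ∧ Raises_get_num_nefs_list (pvRaiseWitness_get_num_nefs_list.1) (pvRaiseWitness_get_num_nefs_list.2.1) (pvRaiseWitness_get_num_nefs_list.2.2.1) (pvRaiseWitness_get_num_nefs_list.2.2.2) ∧ get_num_nefs_list_alt (pvRaiseWitness_get_num_nefs_list.1) (pvRaiseWitness_get_num_nefs_list.2.1) (pvRaiseWitness_get_num_nefs_list.2.2.1) (pvRaiseWitness_get_num_nefs_list.2.2.2) = pvRaiseWitnessOut_get_num_nefs_list)

-- ===== LEMMAS AND PROOFS =====

-- canonical chunk stream both loops are shown to produce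
def pvChunks (endI P S : Int) : Nat → Int → List Int
  | 0, _ => []
  | fuel+1, cur =>
    if cur < endI then
      let t := min P (min ((PySem.Int.floordiv cur S + 1) * S - cur) (endI - cur))
      t :: pvChunks endI P S fuel (cur + t)
    else []

lemma pv_div_mod (cur S : Int) (hS : 0 < S) :
    PySem.Int.floordiv cur S * S + PySem.Int.mod cur S = cur ∧
    0 ≤ PySem.Int.mod cur S ∧ PySem.Int.mod cur S < S :=
  ⟨PySem.Int.floordiv_mul_add_mod cur S, PySem.Int.mod_nonneg cur hS, PySem.Int.mod_lt cur hS⟩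

lemma pv_floordiv_eq (cur S q : Int) (hS : 0 < S) (h1 : q * S ≤ cur) (h2 : cur < (q + 1) * S) :
    PySem.Int.floordiv cur S = q :=
  (PySem.Int.floordiv_eq_iff_of_pos hS).mpr ⟨h1, h2⟩

lemma pvChunks_congr (endI P S : Int) (hP : 1 ≤ P) (hPS : P ≤ S) :
    ∀ (f1 : Nat) (cur : Int) (f2 : Nat), (endI - cur).toNat ≤ f1 → (endI - cur).toNat ≤ f2 →
      pvChunks endI P S f1 cur = pvChunks endI P S f2 cur := by
  intro f1
  induction f1 with
  | zero =>
    intro cur f2 h1 h2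
    have hle : endI ≤ cur := by omega
    cases f2 with
    | zero => rfl
    | succ f2' => simp [pvChunks, not_lt.mpr hle]
  | succ f1' ih =>
    intro cur f2 h1 h2
    by_cases hc : cur < endI
    · have hf2 : ∃ f2', f2 = f2' + 1 := by cases f2 with | zero => omega | succ n => exact ⟨n, rfl⟩
      obtain ⟨f2', rfl⟩ := hf2
      simp only [pvChunks, if_pos hc]
      have hS : 0 < S := lt_of_lt_of_le hP hPS
      obtain ⟨he, hr0, hrS⟩ := pv_div_mod cur S hS
      have hring : (PySem.Int.floordiv cur S + 1) * S = PySem.Int.floordiv cur S * S + S := by ring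
      have ht : (1:Int) ≤ min P (min ((PySem.Int.floordiv cur S + 1) * S - cur) (endI - cur)) := by
        omega
      refine congrArg _ (ih _ f2' ?_ ?_) <;> omega
    · cases f2 with
      | zero => simp [pvChunks, hc]
      | succ f2' => simp [pvChunks, hc]

-- A's loop produces the canonical stream
lemma pvALoop_eq_chunks (endI P S : Int) (hP : 1 ≤ P) (hPS : P ≤ S) :
    ∀ (fuel : Nat) (start : Int), (endI - start).toNat ≤ fuel →
      pvALoop endI P S fuel start = pvChunks endI P S fuel start := by
  intro fuel
  induction fuel with
  | zero => intro start h; rfl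
  | succ f ih =>
    intro start h
    by_cases hc : start < endI
    · have hS : 0 < S := lt_of_lt_of_le hP hPS
      obtain ⟨he, hr0, hrS⟩ := pv_div_mod start S hS
      set q := PySem.Int.floordiv start S with hq
      set r := PySem.Int.mod start S with hr
      have hring1 : (q + 1) * S = q * S + S := by ring
      have hring2 : (q + 1 + 1) * S = q * S + 2 * S := by ring
      -- the seed index of the chunk's last element
      have hes : PySem.Int.floordiv (start + P - 1) S = if start + P - 1 < (q + 1) * S then q else q + 1 := by
        split_ifs with hlt
        · exact pv_floordiv_eq _ _ _ hS (by omega) hlt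
        · exact pv_floordiv_eq _ _ _ hS (by omega) (by omega)
      simp only [pvALoop, pvChunks, if_pos hc, pvFindSeedIdx, pvGetSignalIdx, ← hq, ← hr, hes]
      have hstep :
          (if start + (if (q ≠ if start + P - 1 < (q + 1) * S then q else q + 1)
                        then S - r else P) > endI
            then endI - start
            else if (q ≠ if start + P - 1 < (q + 1) * S then q else q + 1) then S - r else P)
          = min P (min ((q + 1) * S - start) (endI - start)) := by
        split_ifs <;> omega
      rw [hstep]
      refine congrArg _ (ih _ ?_)
      omega
    · cases f with
      | zero => simp [pvALoop, pvChunks, hc]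
      | succ f' => simp [pvALoop, pvChunks, hc]

-- pvBInner on an exhausted span is empty, any fuel
lemma pvBInner_done (hi P : Int) (fuel : Nat) (cur : Int) (h : ¬ cur < hi) :
    pvBInner hi P fuel cur = [] := by
  cases fuel with
  | zero => rfl
  | succ f => simp [pvBInner, h]

-- one clipped seed span followed by the canonical stream from its end is the canonical stream
lemma pvBInner_chunks (endI P S q : Int) (hP : 1 ≤ P) (hPS : P ≤ S) :
    ∀ (n : Nat) (cur : Int) (f : Nat),
      q * S ≤ cur → cur < min ((q + 1) * S) endI → (min ((q + 1) * S) endI - cur).toNat ≤ n →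
      (endI - cur).toNat ≤ f →
      pvBInner (min ((q + 1) * S) endI) P n cur
          ++ pvChunks endI P S (endI - min ((q + 1) * S) endI).toNat (min ((q + 1) * S) endI)
        = pvChunks endI P S f cur := by
  have hS : 0 < S := lt_of_lt_of_le hP hPS
  intro n
  induction n with
  | zero => intro cur f hql hlt hn hf; omega
  | succ n' ih =>
    intro cur f hql hlt hn hf
    set hi := min ((q + 1) * S) endI with hhi
    have hcurE : cur < endI := by omega
    have hf' : ∃ f', f = f' + 1 := by cases f with | zero => omega | succ m => exact ⟨m, rfl⟩
    obtain ⟨f', rfl⟩ := hf'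
    have hqcur : PySem.Int.floordiv cur S = q := pv_floordiv_eq _ _ _ hS hql (by omega)
    simp only [pvBInner, pvChunks, if_pos hlt, if_pos hcurE, hqcur]
    have htv : min P (min ((q + 1) * S - cur) (endI - cur)) = min P (hi - cur) := by omega
    rw [htv, List.cons_append]
    refine congrArg _ ?_
    set t := min P (hi - cur) with htdef
    have ht1 : 1 ≤ t := by omega
    have htle : cur + t ≤ hi := by omega
    by_cases hend : cur + t < hi
    · exact ih (cur + t) f' (by omega) hend (by omega) (by omega)
    · have hEq : cur + t = hi := by omega
      rw [pvBInner_done _ _ _ _ (by omega), List.nil_append, hEq]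
      exact pvChunks_congr endI P S hP hPS _ hi f' (by omega) (by omega)

-- B's outer loop produces the canonical stream
lemma pvBOuter_eq_chunks (endI P S : Int) (hP : 1 ≤ P) (hPS : P ≤ S) :
    ∀ (fuel : Nat) (lo : Int), (endI - lo).toNat ≤ fuel →
      pvBOuter endI P S fuel lo = pvChunks endI P S fuel lo := by
  have hS : 0 < S := lt_of_lt_of_le hP hPS
  intro fuel
  induction fuel with
  | zero => intro lo h; rfl
  | succ f ih =>
    intro lo h
    by_cases hc : lo < endI
    · obtain ⟨he, hr0, hrS⟩ := pv_div_mod lo S hS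
      set q := PySem.Int.floordiv lo S with hq
      simp only [pvBOuter, if_pos hc, ← hq]
      have hring : (q + 1) * S = q * S + S := by ring
      set hi := min ((q + 1) * S) endI with hhi
      have hlohi : lo < hi := by omega
      rw [ih hi (by omega), pvChunks_congr endI P S hP hPS f hi (endI - hi).toNat (by omega) (by omega)]
      exact pvBInner_chunks endI P S q hP hPS _ lo (f + 1) (by omega) hlohi (by omega) h
    · cases f with
      | zero => simp [pvBOuter, pvChunks, hc]
      | succ f' => simp [pvBOuter, pvChunks, hc]

-- ===== VERDICT (by name: the statement is the Claim_ definition above) =====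
theorem get_num_nefs_list_spec : Claim_equal_get_num_nefs_list := by
  intro a b P S _hD hPre
  obtain ⟨hPS, hab, hP⟩ := hPre
  unfold Spec_get_num_nefs_list get_num_nefs_list get_num_nefs_list_alt
  by_cases hlt : a < b
  · have h1 := pvALoop_eq_chunks b P S (hP hlt) hPS (b - a).toNat a (le_refl _)
    have h2 := pvBOuter_eq_chunks b P S (hP hlt) hPS (b - a).toNat a (le_refl _)
    rw [h1, h2]
  · have h0 : (b - a).toNat = 0 := by omega
    rw [h0]; rfl

@[simp] theorem get_num_nefs_list_raises : Claim_raises_get_num_nefs_list := by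
  unfold Claim_raises_get_num_nefs_list
  refine ⟨?_, by decide⟩
  intro a b P S _hD hR hPre
  unfold Raises_get_num_nefs_list at hR
  unfold Pre_get_num_nefs_list at hPre
  omega
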